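-- pv_equiv track=rewrite | github.com/liskos/zadanie25osipov | variant_04/5.py | algor
-- ===== SOURCE A (Python) =====
-- def algor(x):
--     s = ""
--     for i in range(8):
--         s = str(x % 2) + s
--         x = x // 2
--     s1 = ""
--     for i in range(8):
--         if s[i] == "0":
--             s1 += "1"
--         else:
--             s1 += "0"
--     return int(s1, 2) + 1
-- ===== SOURCE B (Python) =====
-- def algor(x):
--     # two's complement of the low 8 bits: invert-and-add-one == 256 - (x mod 256)
--     return 256 - x % 256
-- ===== Notes on version B (the rewrite author's own statement) =====
-- stated objective: simpler
-- what changed: Replaces the two fixed 8-iteration string loops (binary encode, flip each char, reparse with int(s,2)) by a single arithmetic closed form: the 8-bit two's complement of x.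
import Mathlib
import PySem

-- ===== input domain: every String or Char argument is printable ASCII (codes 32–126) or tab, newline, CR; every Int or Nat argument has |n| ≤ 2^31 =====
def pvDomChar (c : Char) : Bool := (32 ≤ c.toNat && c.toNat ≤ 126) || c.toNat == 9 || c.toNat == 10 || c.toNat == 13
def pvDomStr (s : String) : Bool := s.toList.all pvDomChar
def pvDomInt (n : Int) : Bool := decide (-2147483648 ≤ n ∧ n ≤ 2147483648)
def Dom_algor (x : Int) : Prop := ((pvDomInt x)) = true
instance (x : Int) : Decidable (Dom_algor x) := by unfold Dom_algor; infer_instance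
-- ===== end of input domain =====

-- B replaces A's two 8-step string loops (binary encode, flip chars, int(s,2)+1) by the closed form 256 - x % 256 (simpler).


-- ===== PORT A =====
-- first loop: s = str(x % 2) + s; x = x // 2, eight times (string kept as List Char)
def algorS (x : Int) : List Char × Int :=
  (PySem.List.pyRange 0 8 1).foldl
    (fun acc _ => ((PySem.Int.toStr (PySem.Int.mod acc.2 2)).toList ++ acc.1,
                   PySem.Int.floordiv acc.2 2))
    ([], x)

def algor (x : Int) : Int :=
  let s := (algorS x).1
  let s1 := (PySem.List.pyRange 0 8 1).foldl
    (fun acc i => acc ++ (if PySem.List.pyGet? s i = some '0' then ['1'] else ['0']))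
    ([] : List Char)
  -- int(s1, 2): s1 is always eight '0'/'1' chars, so the parse never fails; the none arm is unreachable
  match PySem.Int.ofCharsBase? s1 2 with
  | some v => v + 1
  | none => 0

-- ===== PORT B =====
def algor_alt (x : Int) : Int := 256 - PySem.Int.mod x 256

-- ===== PRECONDITION & SPEC =====
def Spec_algor (x : Int) (out : Int) : Prop := out = algor_alt x
instance (x : Int) (out : Int) : Decidable (Spec_algor x out) := by unfold Spec_algor; infer_instance

-- ===== CLAIM (what is proved, stated in full; the proofs are below) =====
def Claim_equal_algor : Prop := ∀ (x : Int), Dom_algor x → Spec_algor x (algor x)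

-- ===== LEMMAS AND PROOFS =====

-- the first loop's string depends only on x mod 256
theorem algorS_fst_reduce (q r : Int) : (algorS (256 * q + r)).1 = (algorS r).1 := by
  have h2 : (0:Int) < 2 := by norm_num
  unfold algorS
  rw [show PySem.List.pyRange 0 8 1 = [0,1,2,3,4,5,6,7] from rfl]
  simp only [List.foldl,
    PySem.Int.mod_eq_emod_of_pos h2, PySem.Int.floordiv_eq_ediv_of_pos h2]
  have d1 : (256 * q + r) / 2 = 128 * q + r / 2 := by omega
  have m1 : (256 * q + r) % 2 = r % 2 := by omega
  rw [d1, m1]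
  have d2 : (128 * q + r / 2) / 2 = 64 * q + r / 2 / 2 := by omega
  have m2 : (128 * q + r / 2) % 2 = r / 2 % 2 := by omega
  rw [d2, m2]
  have d3 : (64 * q + r / 2 / 2) / 2 = 32 * q + r / 2 / 2 / 2 := by omega
  have m3 : (64 * q + r / 2 / 2) % 2 = r / 2 / 2 % 2 := by omega
  rw [d3, m3]
  have d4 : (32 * q + r / 2 / 2 / 2) / 2 = 16 * q + r / 2 / 2 / 2 / 2 := by omega
  have m4 : (32 * q + r / 2 / 2 / 2) % 2 = r / 2 / 2 / 2 % 2 := by omega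
  rw [d4, m4]
  have d5 : (16 * q + r / 2 / 2 / 2 / 2) / 2 = 8 * q + r / 2 / 2 / 2 / 2 / 2 := by omega
  have m5 : (16 * q + r / 2 / 2 / 2 / 2) % 2 = r / 2 / 2 / 2 / 2 % 2 := by omega
  rw [d5, m5]
  have d6 : (8 * q + r / 2 / 2 / 2 / 2 / 2) / 2 = 4 * q + r / 2 / 2 / 2 / 2 / 2 / 2 := by omega
  have m6 : (8 * q + r / 2 / 2 / 2 / 2 / 2) % 2 = r / 2 / 2 / 2 / 2 / 2 % 2 := by omega
  rw [d6, m6]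
  have d7 : (4 * q + r / 2 / 2 / 2 / 2 / 2 / 2) / 2 = 2 * q + r / 2 / 2 / 2 / 2 / 2 / 2 / 2 := by omega
  have m7 : (4 * q + r / 2 / 2 / 2 / 2 / 2 / 2) % 2 = r / 2 / 2 / 2 / 2 / 2 / 2 % 2 := by omega
  rw [d7, m7]
  have m8 : (2 * q + r / 2 / 2 / 2 / 2 / 2 / 2 / 2) % 2 = r / 2 / 2 / 2 / 2 / 2 / 2 / 2 % 2 := by omega
  rw [m8]

theorem algor_reduce (q r : Int) : algor (256 * q + r) = algor r := by
  unfold algor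
  rw [algorS_fst_reduce q r]

set_option maxRecDepth 16384 in
set_option maxHeartbeats 2000000 in
theorem algor_all256 : ∀ r : Fin 256, algor (r : Int) = algor_alt (r : Int) := by decide

-- ===== VERDICT (by name: the statement is the Claim_ definition above) =====
theorem algor_spec : Claim_equal_algor := by
  intro x _
  unfold Spec_algor
  have hx : x = 256 * (x / 256) + x % 256 := by omega
  have hr : 0 ≤ x % 256 ∧ x % 256 < 256 := by omega
  have hfin := algor_all256 ⟨(x % 256).toNat, by omega⟩
  have hcast : (((x % 256).toNat : Nat) : Int) = x % 256 := by omega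
  rw [hx, algor_reduce]
  simp only [hcast] at hfin
  rw [hfin]
  unfold algor_alt
  have h256 : (0:Int) < 256 := by norm_num
  rw [PySem.Int.mod_eq_emod_of_pos h256, PySem.Int.mod_eq_emod_of_pos h256]
  omega
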